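-- pv_equiv track=rewrite | github.com/SW0BBR/deeplens-functions | detect_functions.py | get_init_comment
-- ===== SOURCE A (Python) =====
-- def get_init_comment(names):
--     init_comment = "Ding dong! "
--     if len(names) == 2:
--         init_comment += "{} and {} are at the door.".format(names[0],names[1])
--     elif len(names) > 2:
--         faces_count = 1
--         for name in names:
--             if len(names) - faces_count > 0:
--                 init_comment += "{}, ".format(name)
--                 faces_count += 1
--             else:
--                 init_comment += "and {} are at the door.".format(name)
--     else:
--         init_comment += "{} is at the door.".format(names[0])
--     return init_comment
-- ===== SOURCE B (Python) =====
-- def get_init_comment(names):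
--     if len(names) == 2:
--         body = "{} and {} are at the door.".format(names[0], names[1])
--     elif len(names) > 2:
--         body = ", ".join(names[:-1]) + ", and " + names[-1] + " are at the door."
--     else:
--         body = "{} is at the door.".format(names[0])
--     return "Ding dong! " + body
-- ===== Notes on version B (the rewrite author's own statement) =====
-- stated objective: simpler
-- what changed: Replaces A's faces_count loop of repeated string += with a single str.join of the leading names plus an appended ', and <last>' clause, composing 'Ding dong! ' with the body once.
import Mathlib
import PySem

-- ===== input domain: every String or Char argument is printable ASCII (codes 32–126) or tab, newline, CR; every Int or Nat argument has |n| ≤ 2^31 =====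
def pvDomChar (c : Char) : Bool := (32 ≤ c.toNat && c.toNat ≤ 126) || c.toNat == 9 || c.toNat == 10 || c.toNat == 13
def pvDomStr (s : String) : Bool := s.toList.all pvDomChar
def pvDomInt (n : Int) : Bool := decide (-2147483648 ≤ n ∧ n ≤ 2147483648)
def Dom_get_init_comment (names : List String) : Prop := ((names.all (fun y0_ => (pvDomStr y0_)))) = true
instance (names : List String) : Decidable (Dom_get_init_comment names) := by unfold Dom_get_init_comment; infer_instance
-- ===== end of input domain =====

-- B replaces A's counter loop by one join-of-prefix plus final-clause expression (objective: simpler).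

-- ===== PORT A =====
def get_init_comment (names : List String) : String :=
  let init := "Ding dong! "
  if names.length = 2 then
    init ++ ((PySem.List.pyGet? names 0).getD "") ++ " and " ++ ((PySem.List.pyGet? names 1).getD "") ++ " are at the door."
  else if names.length > 2 then
    (names.foldl (fun (st : String × Int) name =>
      if (names.length : Int) - st.2 > 0 then
        (st.1 ++ name ++ ", ", st.2 + 1)
      else
        (st.1 ++ "and " ++ name ++ " are at the door.", st.2)) (init, 1)).1
  else
    init ++ ((PySem.List.pyGet? names 0).getD "") ++ " is at the door."

-- ===== PORT B =====
def get_init_comment_alt (names : List String) : String :=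
  let body :=
    if names.length = 2 then
      ((PySem.List.pyGet? names 0).getD "") ++ " and " ++ ((PySem.List.pyGet? names 1).getD "") ++ " are at the door."
    else if names.length > 2 then
      PySem.Str.join ", " (PySem.List.slice names none (some (-1))) ++ ", and " ++ ((PySem.List.pyGet? names (-1)).getD "") ++ " are at the door."
    else
      ((PySem.List.pyGet? names 0).getD "") ++ " is at the door."
  "Ding dong! " ++ body

-- ===== PRECONDITION & SPEC =====
-- Pre_ excludes only the empty list, on which Python A raises IndexError (names[0]); B raises there too.
def Pre_get_init_comment (names : List String) : Prop := names ≠ []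
instance (names : List String) : Decidable (Pre_get_init_comment names) := by unfold Pre_get_init_comment; infer_instance
def pvWitness_get_init_comment : List String := (["Alice", "Bob", "Carol"])

def Spec_get_init_comment (names : List String) (out : String) : Prop := out = get_init_comment_alt names
instance (names : List String) (out : String) : Decidable (Spec_get_init_comment names out) := by unfold Spec_get_init_comment; infer_instance

-- ===== CLAIM (what is proved, stated in full; the proofs are below) =====
def Claim_equal_get_init_comment : Prop := ∀ (names : List String), Dom_get_init_comment names → Pre_get_init_comment names → Spec_get_init_comment names (get_init_comment names)

-- ===== LEMMAS AND PROOFS =====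

/-- The comma-separated trailing clause A's loop produces for the remaining names. -/
def pvCommaClause : List String → String
  | [] => ""
  | [x] => "and " ++ x ++ " are at the door."
  | x :: y :: t => x ++ ", " ++ pvCommaClause (y :: t)

theorem pvJoinCons (l : List String) (x y : String) :
    PySem.Str.join ", " (x :: y :: l) = x ++ ", " ++ PySem.Str.join ", " (y :: l) := by
  simp [PySem.Str.join, PySem.Chars.join_cons_cons]
  rw [show (',' :: ' ' :: PySem.Chars.join [',', ' '] (y.toList :: List.map String.toList l))
        = [',', ' '] ++ PySem.Chars.join [',', ' '] (y.toList :: List.map String.toList l) from rfl,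
     String.ofList_append, String.append_assoc]

theorem pvFoldA (n : Int) (l : List String) (s : String) (c : Int)
    (h : n - c = (l.length : Int) - 1) (hne : l ≠ []) :
    (l.foldl (fun (st : String × Int) name =>
      if n - st.2 > 0 then
        (st.1 ++ name ++ ", ", st.2 + 1)
      else
        (st.1 ++ "and " ++ name ++ " are at the door.", st.2)) (s, c)).1
      = s ++ pvCommaClause l := by
  induction l generalizing s c with
  | nil => exact absurd rfl hne
  | cons x t ih =>
    cases t with
    | nil =>
      simp at h
      rw [List.foldl_cons, if_neg (by omega : ¬ n - c > 0), ← String.toList_inj]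
      simp [pvCommaClause]
    | cons y t' =>
      have hpos : n - c > 0 := by simp at h; omega
      have h' : n - (c + 1) = ((y :: t').length : Int) - 1 := by simp at h ⊢; omega
      rw [List.foldl_cons, if_pos hpos, ih _ _ h' (by simp), ← String.toList_inj]
      simp [pvCommaClause]

theorem pvJoinClause (l : List String) (hl : 2 ≤ l.length) :
    PySem.Str.join ", " l.dropLast ++ ", and " ++ l.getLast! ++ " are at the door."
      = pvCommaClause l := by
  induction l with
  | nil => simp at hl
  | cons x t ih =>
    cases t with
    | nil => simp at hl
    | cons y t' =>
      cases t' with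
      | nil =>
        rw [← String.toList_inj]
        simp [pvCommaClause, PySem.Str.join, List.getLast!]
      | cons z t'' =>
        have ih' := ih (by simp)
        rw [show (x :: y :: z :: t'').dropLast = x :: (y :: z :: t'').dropLast from by simp,
           show (y :: z :: t'').dropLast = y :: (z :: t'').dropLast from by simp,
           pvJoinCons]
        rw [show (x :: y :: z :: t'').getLast! = (y :: z :: t'').getLast! from by
              simp [List.getLast!, List.getLast]]
        rw [show pvCommaClause (x :: y :: z :: t'') = x ++ ", " ++ pvCommaClause (y :: z :: t'') from rfl]
        rw [← ih']
        rw [show (y :: z :: t'').dropLast = y :: (z :: t'').dropLast from by simp,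
           ← String.toList_inj]
        simp

theorem pvGetLastBang (pre : List String) (x : String) : (pre ++ [x]).getLast! = x := by
  induction pre with
  | nil => rfl
  | cons a t ih =>
    cases h : t ++ [x] with
    | nil => simp at h
    | cons b u => simp [List.getLast!] at ih ⊢

theorem pvLastGetD (names : List String) (h : names ≠ []) :
    (PySem.List.pyGet? names (-1)).getD "" = names.getLast! := by
  rcases names.eq_nil_or_concat with h' | ⟨pre, x, hx⟩
  · exact absurd h' h
  · rw [List.concat_eq_append] at hx
    rw [hx, PySem.List.pyGet?_neg_one_append_singleton, pvGetLastBang]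
    rfl

-- ===== VERDICT (by name: the statement is the Claim_ definition above) =====
theorem get_init_comment_spec : Claim_equal_get_init_comment := by
  intro names _ hpre
  unfold Spec_get_init_comment get_init_comment get_init_comment_alt
  by_cases h2 : names.length = 2
  · simp only [if_pos h2]
    rw [← String.toList_inj]; simp
  · by_cases h3 : names.length > 2
    · simp only [h2, h3, if_false, if_pos]
      rw [pvFoldA (names.length : Int) names _ 1 (by simp) hpre]
      rw [PySem.List.slice_to_neg_one, pvLastGetD names hpre, pvJoinClause names (by omega)]
    · simp only [if_neg h2, if_neg h3]
      rw [← String.toList_inj]; simp
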